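-- pv_equiv track=rewrite | github.com/tle46/CS-1301 | HW09.py | pirateTreasure
-- ===== SOURCE A (Python) =====
-- def pirateTreasure(directionList):
--     if len(directionList) == 0:
--         output = 0
--     else:
--         if directionList[0] == "up":
--             output = 1 + pirateTreasure(directionList[1:])
--         else:
--             output = -1 + pirateTreasure(directionList[1:])
--     return output
-- ===== SOURCE B (Python) =====
-- def pirateTreasure(directionList):
--     output = 0
--     for d in directionList:
--         output += 1 if d == "up" else -1
--     return output
-- ===== Notes on version B (the rewrite author's own statement) =====
-- stated objective: faster
-- what changed: Replaced the recursion that slices the list at every step (O(n^2) copying, O(n) call depth) by a single accumulating loop adding +1 for "up" and -1 otherwise.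
import Mathlib
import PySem

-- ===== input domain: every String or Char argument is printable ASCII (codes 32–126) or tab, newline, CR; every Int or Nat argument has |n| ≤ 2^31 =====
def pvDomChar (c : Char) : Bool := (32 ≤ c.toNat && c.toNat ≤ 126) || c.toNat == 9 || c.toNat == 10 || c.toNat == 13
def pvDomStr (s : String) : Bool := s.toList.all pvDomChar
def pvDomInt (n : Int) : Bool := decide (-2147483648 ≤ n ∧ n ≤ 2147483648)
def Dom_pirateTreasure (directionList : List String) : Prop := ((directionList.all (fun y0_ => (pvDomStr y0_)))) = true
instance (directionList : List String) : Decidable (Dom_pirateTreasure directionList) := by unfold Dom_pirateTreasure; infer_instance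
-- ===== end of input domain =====

-- B replaces A's slice-and-recurse (quadratic copying) by one accumulating loop: faster.

-- ===== PORT A =====
-- A: if the list is empty return 0, else 1 + recurse on the tail when the head
-- is "up", else -1 + recurse on the tail ([1:] of a nonempty list = its tail).
def pirateTreasure : List String → Int
  | [] => 0
  | d :: rest => if d == "up" then 1 + pirateTreasure rest else -1 + pirateTreasure rest

-- ===== PORT B =====
def pirateTreasure_alt (directionList : List String) : Int :=
  directionList.foldl (fun output d => output + (if d == "up" then 1 else -1)) 0

-- ===== PRECONDITION & SPEC =====
def Spec_pirateTreasure (directionList : List String) (out : Int) : Prop := out = pirateTreasure_alt directionList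
instance (directionList : List String) (out : Int) : Decidable (Spec_pirateTreasure directionList out) := by unfold Spec_pirateTreasure; infer_instance

-- ===== CLAIM (what is proved, stated in full; the proofs are below) =====
def Claim_equal_pirateTreasure : Prop := ∀ (directionList : List String), Dom_pirateTreasure directionList → Spec_pirateTreasure directionList (pirateTreasure directionList)

-- ===== LEMMAS AND PROOFS =====
-- Loop invariant: folding from accumulator acc yields acc + A's recursive value.
theorem pirateTreasure_foldl (l : List String) (acc : Int) :
    l.foldl (fun output d => output + (if d == "up" then 1 else -1)) acc
      = acc + pirateTreasure l := by
  induction l generalizing acc with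
  | nil => simp [pirateTreasure]
  | cons d rest ih =>
    simp only [List.foldl, pirateTreasure, ih]
    split <;> ring

-- ===== VERDICT (by name: the statement is the Claim_ definition above) =====
theorem pirateTreasure_spec : Claim_equal_pirateTreasure := by
  intro l _
  unfold Spec_pirateTreasure pirateTreasure_alt
  rw [pirateTreasure_foldl]
  ring
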